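-- pv_equiv track=rewrite | github.com/mosew/mtg-swiss-simulator | tournament/match.py | _max_seventh_after_n_rounds
-- ===== SOURCE A (Python) =====
-- from collections import defaultdict
-- from typing import List, Optional
--
-- def _max_seventh_after_n_rounds(scores: List[int], rounds: int) -> int:
--     """
--     Swiss-constrained max 7th-highest score after n rounds. Each round
--     only ~half of each score group can win (they play each other).
--     Used to bound max possible 9th place at end of tournament.
--     """
--     if not scores or len(scores) < 7:
--         return -1
--     current = list(scores)
--     for _ in range(rounds):
--         groups: dict = defaultdict(list)
--         for s in current:
--             groups[s].append(s)
--         next_scores = []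
--         for s in sorted(groups.keys(), reverse=True):
--             count = len(groups[s])
--             winners = (count + 1) // 2
--             next_scores.extend([s + 3] * winners)
--             next_scores.extend([s] * (count - winners))
--         current = next_scores
--     current.sort(reverse=True)
--     return current[6]  # 7th-highest
-- ===== SOURCE B (Python) =====
-- def _max_seventh_after_n_rounds(scores, rounds):
--     if len(scores) < 7:
--         return -1
--     counts = {}
--     for s in scores:
--         counts[s] = counts.get(s, 0) + 1
--     for _ in range(rounds):
--         nxt = {}
--         for s, c in counts.items():
--             w = (c + 1) // 2
--             nxt[s + 3] = nxt.get(s + 3, 0) + w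
--             if c - w > 0:
--                 nxt[s] = nxt.get(s, 0) + (c - w)
--         counts = nxt
--     remaining = 7
--     for s in sorted(counts, reverse=True):
--         remaining -= counts[s]
--         if remaining <= 0:
--             return s
--     return -1  # unreachable: counts always total len(scores) >= 7
-- ===== Notes on version B (the rewrite author's own statement) =====
-- stated objective: faster
-- what changed: B replaces A's per-round expansion of the full score list (group lists, sort of all keys, rebuild of the n-element list, final O(n log n) sort and index) by a score->count dictionary updated per round, and finds the 7th-highest by accumulating counts over the distinct scores in descending order.
import Mathlib
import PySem

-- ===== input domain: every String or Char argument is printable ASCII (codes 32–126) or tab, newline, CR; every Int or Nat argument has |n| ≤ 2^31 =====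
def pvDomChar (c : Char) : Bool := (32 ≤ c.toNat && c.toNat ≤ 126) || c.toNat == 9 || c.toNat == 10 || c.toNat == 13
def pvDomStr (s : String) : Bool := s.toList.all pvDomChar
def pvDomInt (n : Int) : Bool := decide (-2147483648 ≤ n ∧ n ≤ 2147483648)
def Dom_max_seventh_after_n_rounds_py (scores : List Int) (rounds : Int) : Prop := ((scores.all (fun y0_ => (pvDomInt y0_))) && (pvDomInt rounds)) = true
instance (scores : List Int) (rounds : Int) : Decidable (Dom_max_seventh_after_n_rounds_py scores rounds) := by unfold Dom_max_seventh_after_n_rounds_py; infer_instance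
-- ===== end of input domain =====

-- B tracks a score→count dict per round instead of rebuilding the full score list, and scans
-- cumulative counts over the sorted distinct scores for the 7th-highest (objective: faster).

-- ===== PORT A =====
-- groups = defaultdict(list); for s in current: groups[s].append(s)
def pvGroupsA (current : List Int) : PySem.Dict Int (List Int) :=
  current.foldl (fun d s => d.modify s [] (fun g => g ++ [s])) PySem.Dict.empty

-- one iteration of A's `for _ in range(rounds)` body
def pvRoundA (current : List Int) : List Int :=
  let groups := pvGroupsA current
  (PySem.List.sorted groups.keys (fun k => k) true).foldl
    (fun next_scores s =>
      let count := (groups.getD s []).length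
      let winners := (count + 1) / 2
      next_scores ++ List.replicate winners (s + 3) ++ List.replicate (count - winners) s)
    []

-- current[6] is always in range (the round keeps the list length, and the guard ensures ≥ 7),
-- so pyGetD's default is never used.
def max_seventh_after_n_rounds_py (scores : List Int) (rounds : Int) : Int :=
  if scores.isEmpty || decide (scores.length < 7) then -1
  else
    let current := (PySem.List.pyRange 0 rounds 1).foldl (fun cur _ => pvRoundA cur) scores
    PySem.List.pyGetD (PySem.List.sorted current (fun x => x) true) 6 0

-- ===== PORT B =====
-- one iteration of B's round loop on the score→count dict
def pvRoundB (counts : PySem.Dict Int Int) : PySem.Dict Int Int :=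
  counts.items.foldl
    (fun nxt p =>
      let w := PySem.Int.floordiv (p.2 + 1) 2
      let nxt := nxt.insert (p.1 + 3) (nxt.getD (p.1 + 3) 0 + w)
      if p.2 - w > 0 then nxt.insert p.1 (nxt.getD p.1 0 + (p.2 - w)) else nxt)
    PySem.Dict.empty

-- the final scan; counts[s] is a lookup of a present key, so getD's default is never used
def pvScanB (counts : PySem.Dict Int Int) : List Int → Int → Int
  | [], _ => -1
  | s :: rest, remaining =>
      let remaining := remaining - counts.getD s 0
      if remaining ≤ 0 then s else pvScanB counts rest remaining

def max_seventh_after_n_rounds_py_alt (scores : List Int) (rounds : Int) : Int :=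
  if decide (scores.length < 7) then -1
  else
    let counts := scores.foldl (fun d x => d.insert x (d.getD x 0 + 1)) PySem.Dict.empty
    let counts := (PySem.List.pyRange 0 rounds 1).foldl (fun c _ => pvRoundB c) counts
    pvScanB counts (PySem.List.sorted counts.keys (fun k => k) true) 7

-- ===== PRECONDITION & SPEC =====
def Spec_max_seventh_after_n_rounds_py (scores : List Int) (rounds : Int) (out : Int) : Prop := out = max_seventh_after_n_rounds_py_alt scores rounds
instance (scores : List Int) (rounds : Int) (out : Int) : Decidable (Spec_max_seventh_after_n_rounds_py scores rounds out) := by unfold Spec_max_seventh_after_n_rounds_py; infer_instance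

-- ===== CLAIM (what is proved, stated in full; the proofs are below) =====
def Claim_equal_max_seventh_after_n_rounds_py : Prop := ∀ (scores : List Int) (rounds : Int), Dom_max_seventh_after_n_rounds_py scores rounds → Spec_max_seventh_after_n_rounds_py scores rounds (max_seventh_after_n_rounds_py scores rounds)

-- ===== LEMMAS AND PROOFS =====

-- the correspondence: cnt is exactly the score→count table of the score list cur
def pvInv (cur : List Int) (cnt : PySem.Dict Int Int) : Prop :=
  cnt.keys.Nodup ∧ (∀ v : Int, cnt.getD v 0 = (cur.count v : Int)) ∧
    (∀ v ∈ cnt.keys, cnt.getD v 0 ≠ 0)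

theorem pvInv_init (scores : List Int) :
    pvInv scores (scores.foldl (fun d x => d.insert x (d.getD x 0 + 1)) PySem.Dict.empty) := by
  rw [PySem.Dict.foldl_insert_getD_add_one_eq_counter]
  refine ⟨PySem.Dict.nodup_keys_counter scores, fun v => PySem.Dict.getD_counter scores v, ?_⟩
  intro v hv
  rw [PySem.Dict.keys_counter, PySem.Set.mem_ofList] at hv
  rw [PySem.Dict.getD_counter]
  have := List.count_pos_iff.mpr hv
  omega

theorem pvGroupsA_getD (cur : List Int) (c : Int) :
    (pvGroupsA cur).getD c [] = List.replicate (cur.count c) c := by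
  unfold pvGroupsA
  have : cur.foldl (fun d s => d.modify s [] (fun g => g ++ [s])) PySem.Dict.empty
      = (cur.map (fun s => ((s : Int), (s : Int)))).foldl
          (fun d p => d.modify p.1 [] (fun g => g ++ [p.2])) PySem.Dict.empty := by
    rw [List.foldl_map]
  rw [this, PySem.Dict.getD_foldl_modify_append]
  simp [List.filter_map, Function.comp_def, List.filter_beq]

theorem pvGroupsA_keys_nodup (cur : List Int) : (pvGroupsA cur).keys.Nodup := by
  unfold pvGroupsA
  exact PySem.Dict.nodup_keys_foldl_modify_key cur (fun s => s) [] (fun _ x g => g ++ [x])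
    PySem.Dict.empty PySem.Dict.nodup_keys_empty

theorem pvGroupsA_mem_keys (cur : List Int) (v : Int) :
    v ∈ (pvGroupsA cur).keys ↔ v ∈ cur := by
  unfold pvGroupsA
  rw [PySem.Dict.keys_foldl_modify_key cur (fun s => s) [] (fun _ x g => g ++ [x])]
  simp [PySem.Set.mem_update, PySem.Dict.keys_empty]

-- B's per-round "winners" count, on the Nat side
def pvW (c : Nat) : Nat := (c + 1) / 2

def pvBlockA (cur : List Int) (s : Int) : List Int :=
  List.replicate (pvW (cur.count s)) (s + 3) ++
    List.replicate (cur.count s - pvW (cur.count s)) s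

theorem pvRoundA_eq (cur : List Int) :
    pvRoundA cur =
      (PySem.List.sorted (pvGroupsA cur).keys (fun k => k) true).flatMap (pvBlockA cur) := by
  unfold pvRoundA
  simp only [pvGroupsA_getD, List.length_replicate]
  have := PySem.List.foldl_append_eq_flatMap (pvBlockA cur)
    (PySem.List.sorted (pvGroupsA cur).keys (fun k => k) true) []
  simp only [List.nil_append] at this
  rw [← this]
  congr 1
  funext next s
  simp [pvBlockA, pvW, List.append_assoc]

theorem pvSum_if_single {M : Type} [AddCommMonoid M] (ks : List Int) (hnd : ks.Nodup)
    (f : Int → M) (a : Int) (h0 : a ∉ ks → f a = 0) :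
    (ks.map (fun s => if s = a then f s else 0)).sum = f a := by
  induction ks with
  | nil => simpa using (h0 (by simp)).symm
  | cons x xs ih =>
      simp only [List.map_cons, List.sum_cons, List.nodup_cons] at *
      by_cases hx : x = a
      · subst hx
        have hz : (xs.map (fun s => if s = x then f s else 0)).sum = 0 := by
          apply List.sum_eq_zero; intro y hy
          simp only [List.mem_map] at hy
          obtain ⟨s, hs, rfl⟩ := hy
          have hne : ¬ s = x := fun h => hnd.1 (h ▸ hs)
          simp [hne]
        simp [hz]
      · rw [if_neg hx, ih hnd.2 (fun ha => h0 (by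
          simp only [List.mem_cons, not_or]
          exact ⟨fun h => hx h.symm, ha⟩)), zero_add]

theorem pvCount_roundA (cur : List Int) (t : Int) :
    (pvRoundA cur).count t =
      pvW (cur.count (t - 3)) + (cur.count t - pvW (cur.count t)) := by
  rw [pvRoundA_eq, List.count_flatMap]
  have hnd : (PySem.List.sorted (pvGroupsA cur).keys (fun k => k) true).Nodup :=
    List.Perm.nodup (PySem.List.sorted_perm (pvGroupsA cur).keys (fun k => k) true).symm
      (pvGroupsA_keys_nodup cur)
  have hmem : ∀ v : Int, v ∈ PySem.List.sorted (pvGroupsA cur).keys (fun k => k) true ↔ v ∈ cur := by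
    intro v
    rw [PySem.List.mem_sorted]
    exact pvGroupsA_mem_keys cur v
  have hblock : ∀ s : Int, List.count t (pvBlockA cur s) =
      (if s = t - 3 then pvW (cur.count s) else 0) +
        (if s = t then cur.count s - pvW (cur.count s) else 0) := by
    intro s
    have h3 : ((s + 3 : Int) = t) ↔ s = t - 3 := by omega
    simp [pvBlockA, List.count_append, List.count_replicate, beq_iff_eq, h3]
  simp only [Function.comp_def, hblock]
  rw [List.sum_map_add]
  rw [pvSum_if_single _ hnd (fun s => pvW (cur.count s)) (t - 3) (fun hn => by
        have : cur.count (t - 3) = 0 := by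
          rw [List.count_eq_zero]; exact fun hc => hn ((hmem (t - 3)).mpr hc)
        simp [this, pvW])]
  rw [pvSum_if_single _ hnd (fun s => cur.count s - pvW (cur.count s)) t (fun hn => by
        have : cur.count t = 0 := by
          rw [List.count_eq_zero]; exact fun hc => hn ((hmem t).mpr hc)
        simp [this, pvW])]

-- B's round arithmetic on the Int side
def pvWI (c : Int) : Int := PySem.Int.floordiv (c + 1) 2

def pvLI (c : Int) : Int := if c - pvWI c > 0 then c - pvWI c else 0

theorem pvWI_cast (c : Nat) : pvWI (c : Int) = (pvW c : Int) := by
  unfold pvWI pvW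
  rw [show ((c : Int) + 1) = ((c + 1 : Nat) : Int) by push_cast; ring,
    show (2 : Int) = ((2 : Nat) : Int) by norm_num, PySem.Int.floordiv_natCast]

theorem pvLI_cast (c : Nat) : pvLI (c : Int) = ((c - pvW c : Nat) : Int) := by
  unfold pvLI
  rw [pvWI_cast]
  split_ifs with hc <;> omega

theorem pvW_le (c : Nat) : pvW c ≤ c := by unfold pvW; omega

theorem pvRoundB_getD_fold (l : List (Int × Int)) (d : PySem.Dict Int Int) (t : Int) :
    (l.foldl
      (fun nxt p =>
        let w := PySem.Int.floordiv (p.2 + 1) 2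
        let nxt := nxt.insert (p.1 + 3) (nxt.getD (p.1 + 3) 0 + w)
        if p.2 - w > 0 then nxt.insert p.1 (nxt.getD p.1 0 + (p.2 - w)) else nxt) d).getD t 0 =
      d.getD t 0 +
        (l.map (fun p => (if p.1 + 3 = t then pvWI p.2 else 0) +
          (if p.1 = t then pvLI p.2 else 0))).sum := by
  induction l generalizing d with
  | nil => simp
  | cons p ps ih =>
      simp only [List.foldl_cons, List.map_cons, List.sum_cons]
      have h33 : (p.1 : Int) ≠ p.1 + 3 := by omega
      by_cases hw : p.2 - PySem.Int.floordiv (p.2 + 1) 2 > 0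
      · rw [if_pos hw, ih]
        by_cases h1 : t = p.1 + 3
        · rw [h1, PySem.Dict.getD_insert_of_ne _ _ _ (by omega : (p.1 : Int) + 3 ≠ p.1),
            PySem.Dict.getD_insert_self, if_pos rfl,
            if_neg (by omega : ¬ (p.1 : Int) = p.1 + 3)]
          simp only [pvWI]
          ring
        · by_cases h2 : t = p.1
          · rw [h2, PySem.Dict.getD_insert_self, PySem.Dict.getD_insert_of_ne _ _ _ h33,
              if_neg (by omega : ¬ (p.1 : Int) + 3 = p.1), if_pos rfl]
            simp only [pvLI, pvWI]
            rw [if_pos hw]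
            ring
          · rw [PySem.Dict.getD_insert_of_ne _ _ _ h2, PySem.Dict.getD_insert_of_ne _ _ _ h1,
              if_neg (fun h => h1 h.symm), if_neg (fun h => h2 h.symm)]
            ring
      · rw [if_neg hw, ih]
        by_cases h1 : t = p.1 + 3
        · rw [h1, PySem.Dict.getD_insert_self, if_pos rfl,
            if_neg (by omega : ¬ (p.1 : Int) = p.1 + 3)]
          simp only [pvWI]
          ring
        · rw [PySem.Dict.getD_insert_of_ne _ _ _ h1, if_neg (fun h => h1 h.symm)]
          by_cases h2 : t = p.1
          · rw [h2, if_pos rfl]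
            simp only [pvLI, pvWI]
            rw [if_neg hw]
            ring
          · rw [if_neg (fun h => h2 h.symm)]
            ring

theorem pvNot_mem_getD (cnt : PySem.Dict Int Int) (v : Int) (h : v ∉ cnt.keys) :
    cnt.getD v 0 = 0 := by
  apply PySem.Dict.getD_of_not_contains
  rw [← Bool.not_eq_true, PySem.Dict.contains_iff_mem_keys]
  exact h

theorem pvRoundB_getD (cnt : PySem.Dict Int Int) (hnd : cnt.keys.Nodup) (t : Int) :
    (pvRoundB cnt).getD t 0 = pvWI (cnt.getD (t - 3) 0) + pvLI (cnt.getD t 0) := by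
  unfold pvRoundB
  rw [pvRoundB_getD_fold, PySem.Dict.getD_empty,
    PySem.Dict.items_eq_map_keys cnt hnd 0, List.map_map]
  simp only [Function.comp_def]
  have h3 : ∀ k : Int, (k + 3 = t) ↔ (k = t - 3) := by omega
  simp only [h3]
  rw [List.sum_map_add]
  rw [pvSum_if_single _ hnd (fun k => pvWI (cnt.getD k 0)) (t - 3) (fun hn => by
        show pvWI (cnt.getD (t - 3) 0) = 0
        rw [pvNot_mem_getD cnt _ hn]; decide)]
  rw [pvSum_if_single _ hnd (fun k => pvLI (cnt.getD k 0)) t (fun hn => by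
        show pvLI (cnt.getD t 0) = 0
        rw [pvNot_mem_getD cnt _ hn]; decide)]
  ring

theorem pvRoundB_keys (l : List (Int × Int)) (d : PySem.Dict Int Int) (hd : d.keys.Nodup) :
    (l.foldl
      (fun nxt p =>
        let w := PySem.Int.floordiv (p.2 + 1) 2
        let nxt := nxt.insert (p.1 + 3) (nxt.getD (p.1 + 3) 0 + w)
        if p.2 - w > 0 then nxt.insert p.1 (nxt.getD p.1 0 + (p.2 - w)) else nxt) d).keys.Nodup ∧
    ∀ v ∈ (l.foldl
      (fun nxt p =>
        let w := PySem.Int.floordiv (p.2 + 1) 2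
        let nxt := nxt.insert (p.1 + 3) (nxt.getD (p.1 + 3) 0 + w)
        if p.2 - w > 0 then nxt.insert p.1 (nxt.getD p.1 0 + (p.2 - w)) else nxt) d).keys,
      v ∈ d.keys ∨ ∃ p ∈ l, v = p.1 + 3 ∨ (v = p.1 ∧ p.2 - pvWI p.2 > 0) := by
  induction l generalizing d with
  | nil => exact ⟨hd, fun v hv => Or.inl hv⟩
  | cons p ps ih =>
      simp only [List.foldl_cons]
      by_cases hw : p.2 - PySem.Int.floordiv (p.2 + 1) 2 > 0
      · simp only [hw, if_pos]
        obtain ⟨ihn, ihm⟩ := ih _ (PySem.Dict.nodup_keys_insert _ _ _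
          (PySem.Dict.nodup_keys_insert _ _ _ hd))
        refine ⟨ihn, fun v hv => ?_⟩
        rcases ihm v hv with hin | ⟨q, hq, hc⟩
        · rw [PySem.Dict.mem_keys_insert] at hin
          rcases hin with rfl | hin
          · exact Or.inr ⟨p, by simp, Or.inr ⟨rfl, by simpa [pvWI] using hw⟩⟩
          · rw [PySem.Dict.mem_keys_insert] at hin
            rcases hin with rfl | hin
            · exact Or.inr ⟨p, by simp, Or.inl rfl⟩
            · exact Or.inl hin
        · exact Or.inr ⟨q, by simp [hq], hc⟩
      · simp only [hw, if_false]
        obtain ⟨ihn, ihm⟩ := ih _ (PySem.Dict.nodup_keys_insert _ _ _ hd)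
        refine ⟨ihn, fun v hv => ?_⟩
        rcases ihm v hv with hin | ⟨q, hq, hc⟩
        · rw [PySem.Dict.mem_keys_insert] at hin
          rcases hin with rfl | hin
          · exact Or.inr ⟨p, by simp, Or.inl rfl⟩
          · exact Or.inl hin
        · exact Or.inr ⟨q, by simp [hq], hc⟩

theorem pvInv_round (cur : List Int) (cnt : PySem.Dict Int Int) (h : pvInv cur cnt) :
    pvInv (pvRoundA cur) (pvRoundB cnt) := by
  obtain ⟨hnd, hgetD, hpos⟩ := h
  have hgetD' : ∀ t : Int, (pvRoundB cnt).getD t 0 = ((pvRoundA cur).count t : Int) := by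
    intro t
    rw [pvRoundB_getD cnt hnd t, pvCount_roundA, hgetD, hgetD, pvWI_cast, pvLI_cast]
    push_cast
    ring
  have hkeys := pvRoundB_keys cnt.items PySem.Dict.empty PySem.Dict.nodup_keys_empty
  refine ⟨hkeys.1, hgetD', fun v hv => ?_⟩
  rcases hkeys.2 v hv with hin | ⟨p, hp, hc⟩
  · simp [PySem.Dict.keys_empty] at hin
  · have hpk : p.1 ∈ cnt.keys := PySem.Dict.mem_keys_of_mem_items cnt hp
    have hpv : p.2 = (cur.count p.1 : Int) := by
      rw [← hgetD p.1]
      exact (PySem.Dict.getD_of_mem_items cnt (by simpa using hp) hnd 0).symm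
    have hcount : 1 ≤ cur.count p.1 := by
      have := hpos p.1 hpk
      rw [hgetD p.1] at this
      omega
    rw [hgetD' v, pvCount_roundA]
    rcases hc with rfl | ⟨rfl, hgt⟩
    · have : p.1 + 3 - 3 = p.1 := by ring
      rw [this]
      have : 1 ≤ pvW (cur.count p.1) := by unfold pvW; omega
      omega
    · rw [hpv, pvWI_cast] at hgt
      have := pvW_le (cur.count p.1)
      omega

theorem pvRoundA_length (cur : List Int) : (pvRoundA cur).length = cur.length := by
  rw [pvRoundA_eq, List.length_flatMap]
  have hb : ∀ s : Int, (pvBlockA cur s).length = cur.count s := by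
    intro s
    have := pvW_le (cur.count s)
    simp [pvBlockA]
    omega
  simp only [hb]
  have hperm : (PySem.List.sorted (pvGroupsA cur).keys (fun k => k) true).Perm cur.dedup := by
    rw [List.perm_ext_iff_of_nodup
      (List.Perm.nodup (PySem.List.sorted_perm (pvGroupsA cur).keys (fun k => k) true).symm
        (pvGroupsA_keys_nodup cur)) cur.nodup_dedup]
    intro a
    rw [PySem.List.mem_sorted, pvGroupsA_mem_keys, List.mem_dedup]
  rw [List.Perm.sum_eq (hperm.map (fun s => cur.count s))]
  exact List.sum_map_count_dedup_eq_length cur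

theorem pvFold (l : List Int) (cur : List Int) (cnt : PySem.Dict Int Int) (h : pvInv cur cnt) :
    pvInv (l.foldl (fun c _ => pvRoundA c) cur) (l.foldl (fun c _ => pvRoundB c) cnt) ∧
      (l.foldl (fun c _ => pvRoundA c) cur).length = cur.length := by
  induction l generalizing cur cnt with
  | nil => exact ⟨h, rfl⟩
  | cons x xs ih =>
      obtain ⟨h1, h2⟩ := ih (pvRoundA cur) (pvRoundB cnt) (pvInv_round cur cnt h)
      exact ⟨h1, by simpa [pvRoundA_length] using h2⟩

theorem pvBlocks_pairwise (cur : List Int) (ks : List Int)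
    (h : ks.Pairwise (fun a b => b ≤ a)) :
    (ks.flatMap fun k => List.replicate (cur.count k) k).Pairwise (fun a b : Int => b ≤ a) := by
  induction ks with
  | nil => simp
  | cons k rest ih =>
      rw [List.pairwise_cons] at h
      rw [List.flatMap_cons, List.pairwise_append]
      refine ⟨List.pairwise_replicate.mpr (Or.inr le_rfl), ih h.2, ?_⟩
      intro x hx y hy
      rw [List.eq_of_mem_replicate hx]
      rw [List.mem_flatMap] at hy
      obtain ⟨k', hk', hy⟩ := hy
      rw [List.eq_of_mem_replicate hy]
      exact h.1 k' hk'

theorem pvBlocks_count (cur : List Int) (ks : List Int) (hnd : ks.Nodup)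
    (hsup : ∀ v : Int, cur.count v ≠ 0 → v ∈ ks) (t : Int) :
    (ks.flatMap fun k => List.replicate (cur.count k) k).count t = cur.count t := by
  rw [List.count_flatMap]
  have hrep : List.map (List.count t ∘ fun k => List.replicate (cur.count k) k) ks =
      List.map (fun k => if k = t then cur.count k else 0) ks :=
    List.map_congr_left (fun k _ => by simp [List.count_replicate, beq_iff_eq])
  rw [hrep]
  exact pvSum_if_single ks hnd (fun k => cur.count k) t
    (fun hn => by by_contra hc; exact hn (hsup t hc))

theorem pvScan_aux (cnt : PySem.Dict Int Int) (cur : List Int)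
    (hgetD : ∀ v : Int, cnt.getD v 0 = (cur.count v : Int)) (ks : List Int) (r : Int)
    (hpos : ∀ k ∈ ks, 0 < cur.count k) (hr : 1 ≤ r)
    (hlen : r ≤ ((ks.flatMap fun k => List.replicate (cur.count k) k)).length) :
    PySem.List.pyGetD (ks.flatMap fun k => List.replicate (cur.count k) k) (r - 1) 0 =
      pvScanB cnt ks r := by
  induction ks generalizing r with
  | nil =>
      simp only [List.flatMap_nil, List.length_nil] at hlen
      omega
  | cons k rest ih =>
      have hc : 0 < cur.count k := hpos k (by simp)
      rw [List.flatMap_cons] at hlen ⊢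
      rw [List.length_append, List.length_replicate] at hlen
      show _ = pvScanB cnt (k :: rest) r
      rw [pvScanB, hgetD k]
      by_cases hle : r - (cur.count k : Int) ≤ 0
      · rw [if_pos hle]
        rw [PySem.List.pyGetD_eq_getElem _ _ (by omega) (by
          rw [List.length_append, List.length_replicate]
          push_cast
          omega)]
        rw [List.getElem_append_left (by
          rw [List.length_replicate]
          omega)]
        exact List.getElem_replicate _
      · rw [if_neg hle]
        rw [← ih (r - (cur.count k : Int)) (fun k' hk' => hpos k' (by simp [hk']))
          (by omega) (by omega)]
        rw [PySem.List.pyGetD_eq_getElem _ _ (by omega) (by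
            rw [List.length_append, List.length_replicate]
            push_cast
            omega),
          PySem.List.pyGetD_eq_getElem _ _ (by omega) (by push_cast at hlen ⊢; omega)]
        rw [List.getElem_append_right (by rw [List.length_replicate]; omega)]
        congr 1
        rw [List.length_replicate]
        omega

theorem pvFinal (cur : List Int) (cnt : PySem.Dict Int Int) (h : pvInv cur cnt)
    (hlen : 7 ≤ cur.length) :
    PySem.List.pyGetD (PySem.List.sorted cur (fun x => x) true) 6 0 =
      pvScanB cnt (PySem.List.sorted cnt.keys (fun k => k) true) 7 := by
  obtain ⟨hnd, hgetD, hpos⟩ := h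
  have hndks : (PySem.List.sorted cnt.keys (fun k => k) true).Nodup :=
    List.Perm.nodup (PySem.List.sorted_perm cnt.keys (fun k => k) true).symm hnd
  have hmemks : ∀ v : Int, v ∈ PySem.List.sorted cnt.keys (fun k => k) true ↔ v ∈ cnt.keys :=
    fun v => PySem.List.mem_sorted cnt.keys (fun k => k) true v
  have hsup : ∀ v : Int, cur.count v ≠ 0 → v ∈ PySem.List.sorted cnt.keys (fun k => k) true := by
    intro v hv
    rw [hmemks]
    by_contra hn
    have := pvNot_mem_getD cnt v hn
    rw [hgetD v] at this
    omega
  have hposks : ∀ k ∈ PySem.List.sorted cnt.keys (fun k => k) true, 0 < cur.count k := by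
    intro k hk
    have := hpos k ((hmemks k).mp hk)
    rw [hgetD k] at this
    omega
  have hperm : (PySem.List.sorted cur (fun x => x) true).Perm
      ((PySem.List.sorted cnt.keys (fun k => k) true).flatMap
        fun k => List.replicate (cur.count k) k) := by
    refine (PySem.List.sorted_perm cur (fun x => x) true).trans (List.perm_iff_count.mpr ?_)
    intro a
    rw [pvBlocks_count cur _ hndks hsup a]
  have heq : PySem.List.sorted cur (fun x => x) true =
      (PySem.List.sorted cnt.keys (fun k => k) true).flatMap
        fun k => List.replicate (cur.count k) k := by
    refine List.Perm.eq_of_pairwise (fun a b _ _ h1 h2 => le_antisymm h2 h1) ?_ ?_ hperm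
    · exact PySem.List.sorted_pairwise_rev cur (fun x => x)
    · exact pvBlocks_pairwise cur _ (PySem.List.sorted_pairwise_rev cnt.keys (fun k => k))
  have hlen2 : (7 : Int) ≤ ((PySem.List.sorted cnt.keys (fun k => k) true).flatMap
      fun k => List.replicate (cur.count k) k).length := by
    rw [← heq, PySem.List.length_sorted]
    exact_mod_cast hlen
  rw [heq, show (6 : Int) = 7 - 1 by norm_num]
  exact pvScan_aux cnt cur hgetD _ 7 hposks (by norm_num) hlen2


-- ===== VERDICT (by name: the statement is the Claim_ definition above) =====
theorem max_seventh_after_n_rounds_py_spec : Claim_equal_max_seventh_after_n_rounds_py := by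
  intro scores rounds _
  unfold Spec_max_seventh_after_n_rounds_py
  unfold max_seventh_after_n_rounds_py max_seventh_after_n_rounds_py_alt
  by_cases h7 : scores.length < 7
  · simp [h7]
  · have hne : scores.isEmpty = false := by
      rw [List.isEmpty_eq_false_iff]; intro h; subst h; simp at h7
    simp only [h7, hne, decide_false, Bool.or_false]
    obtain ⟨hinv, hlen⟩ := pvFold (PySem.List.pyRange 0 rounds 1) scores _ (pvInv_init scores)
    exact pvFinal _ _ hinv (by omega)
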